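-- pv_equiv track=rewrite | github.com/sthuthii/HF-Repo | repomap_roles/optimization.py | optimize_dependency_traversal
-- ===== SOURCE A (Python) =====
-- from typing import Dict, Set
--
-- def optimize_dependency_traversal(
--     graph: Dict[str, Set[str]],
--     start_file: str,
--     max_depth: int = 2,
-- ) -> Dict[int, Set[str]]:
--     """
--     Optimized graph traversal with early stopping.
--
--     Techniques:
--     - BFS with visited set (avoid cycles)
--     - Depth limit (prevent explosion)
--     - Prune irrelevant nodes
--     """
--     from collections import deque
--
--     visited = set()
--     queue = deque([(start_file, 0)])
--     result = {}
--
--     while queue: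
--         current, depth = queue.popleft()
--
--         if depth > max_depth:
--             continue
--
--         if current in visited:
--             continue
--
--         visited.add(current)
--
--         if depth not in result:
--             result[depth] = set()
--         result[depth].add(current)
--
--         # Only traverse first 10 dependencies (prune)
--         for neighbor in list(graph.get(current, set()))[:10]:
--             if neighbor not in visited:
--                 queue.append((neighbor, depth + 1))
--
--     return result
-- ===== SOURCE B (Python) =====
-- def optimize_dependency_traversal(graph, start_file, max_depth=2):
--     """Level-synchronous BFS: depth is the loop index; a whole frontier is
--     expanded per iteration instead of a (node, depth) queue."""
--     visited = set()
--     result = {}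
--     frontier = [start_file]
--     for depth in range(0, max_depth + 1):
--         if not frontier:
--             break
--         next_frontier = []
--         for node in frontier:
--             if node in visited:
--                 continue
--             visited.add(node)
--             result.setdefault(depth, set()).add(node)
--             for neighbor in list(graph.get(node, set()))[:10]:
--                 if neighbor not in visited:
--                     next_frontier.append(neighbor)
--         frontier = next_frontier
--     return result
-- ===== Notes on version B (the rewrite author's own statement) =====
-- stated objective: alternative
-- what changed: Replaces the single (node, depth)-pair deque loop by a level-synchronous BFS: a frontier list is expanded one whole depth layer per iteration of 'for depth in range(0, max_depth + 1)', so the depth is the loop index instead of being stored in every queue entry. Pre_ excludes graphs in which some entry has more than 10 distinct neighbours, where A's list(set)[:10] truncation keeps an arbitrary 10 chosen by Python's unmodelled set hash order.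
import Mathlib
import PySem

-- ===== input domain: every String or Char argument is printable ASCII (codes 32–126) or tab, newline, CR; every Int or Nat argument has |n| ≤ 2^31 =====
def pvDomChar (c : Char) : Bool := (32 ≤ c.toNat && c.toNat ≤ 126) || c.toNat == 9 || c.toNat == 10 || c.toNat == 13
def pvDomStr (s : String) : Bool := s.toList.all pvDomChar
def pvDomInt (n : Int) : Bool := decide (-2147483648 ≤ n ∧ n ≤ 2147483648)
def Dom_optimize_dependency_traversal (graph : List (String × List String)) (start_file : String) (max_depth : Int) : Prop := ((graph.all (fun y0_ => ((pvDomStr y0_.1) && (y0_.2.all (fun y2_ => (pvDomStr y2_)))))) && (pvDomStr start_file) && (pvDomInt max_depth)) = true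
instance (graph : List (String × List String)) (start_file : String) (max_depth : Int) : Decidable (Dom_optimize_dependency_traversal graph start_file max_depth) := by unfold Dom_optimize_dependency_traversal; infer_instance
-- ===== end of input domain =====

-- B rewrites A's (node, depth)-pair deque BFS as a level-synchronous BFS (whole frontier per
-- depth, depth = loop index); equivalence of the two traversals is proved below (alternative).

-- ===== PORT A =====
-- shared input decoding: the Python argument is a dict mapping str to set[str]
def pvToGraph (graph : List (String × List String)) : PySem.Dict String (PySem.Set String) :=
  PySem.Dict.ofList (graph.map (fun p => (p.1, PySem.Set.ofList p.2)))

-- `for neighbor in list(graph.get(cur, set()))[:10]: if neighbor not in visited: …append(neighbor…)`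
-- (identical line in both Pythons; the enqueue/extend target differs in the callers)
def pvNeighbors (g : PySem.Dict String (PySem.Set String)) (visited : PySem.Set String)
    (cur : String) : List String :=
  (PySem.List.slice (PySem.Dict.getD g cur PySem.Set.empty) none (some 10)).filter
    (fun n => !(PySem.Set.contains visited n))

-- facts the termination measure of pvLoopA needs (cited in its decreasing_by)
theorem pv_get?_mem_values (g : PySem.Dict String (PySem.Set String)) (k : String)
    (v : PySem.Set String) (h : PySem.Dict.get? g k = some v) : v ∈ g.values := by
  obtain ⟨items⟩ := g
  induction items with
  | nil => simp [PySem.Dict.get?] at h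
  | cons p rest ih =>
      rw [show (PySem.Dict.mk (p :: rest)) = ({ items := (p.1, p.2) :: rest } : PySem.Dict String (PySem.Set String)) from rfl,
        PySem.Dict.get?_mk_cons] at h
      by_cases hk : (p.1 == k) = true
      · rw [if_pos hk] at h
        simp [PySem.Dict.values, ← Option.some_inj.1 h]
      · rw [if_neg hk] at h
        have := ih h
        simp [PySem.Dict.values] at this ⊢
        exact Or.inr this

theorem pv_ns_subset (g : PySem.Dict String (PySem.Set String)) (visited : PySem.Set String)
    (cur : String) : pvNeighbors g visited cur ⊆ g.values.flatMap (fun s => s) := by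
  intro x hx
  have hx' : x ∈ PySem.Dict.getD g cur PySem.Set.empty := by
    have h2 := List.mem_of_mem_filter hx
    rw [PySem.List.slice_to _ (by norm_num)] at h2
    exact List.take_subset _ _ h2
  cases hg : PySem.Dict.get? g cur with
  | none => simp [PySem.Dict.getD, hg, PySem.Set.empty] at hx'
  | some v =>
      simp only [PySem.Dict.getD, hg, Option.getD_some] at hx'
      simp only [List.mem_flatMap]
      exact ⟨v, pv_get?_mem_values g cur v hg, hx'⟩

theorem pv_ns_len (g : PySem.Dict String (PySem.Set String)) (visited : PySem.Set String)
    (cur : String) : (pvNeighbors g visited cur).length ≤ 10 := by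
  unfold pvNeighbors
  rw [PySem.List.slice_to _ (by norm_num)]
  calc (List.filter (fun n => !(PySem.Set.contains visited n))
          (List.take (10:Int).toNat (PySem.Dict.getD g cur PySem.Set.empty))).length
      ≤ (List.take (10:Int).toNat (PySem.Dict.getD g cur PySem.Set.empty)).length :=
        List.length_filter_le _ _
    _ ≤ 10 := by simp [List.length_take]

theorem pv_card_mono (A B v : List String) (h : A ⊆ B) :
    (A.toFinset \ v.toFinset).card ≤ (B.toFinset \ v.toFinset).card := by
  apply Finset.card_le_card
  apply Finset.sdiff_subset_sdiff _ (by rfl)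
  intro x hx
  rw [List.mem_toFinset] at *
  exact h hx

theorem pv_base_mono (vals : List String) (c : String) (d : Int) (rest : List (String × Int)) :
    vals ++ rest.map Prod.fst ⊆ vals ++ ((c, d) :: rest).map Prod.fst := by
  intro x hx
  rcases List.mem_append.1 hx with h | h
  · exact List.mem_append.2 (Or.inl h)
  · exact List.mem_append.2 (Or.inr (by simp at h ⊢; exact Or.inr h))

-- literal port of A's while-queue loop
def pvLoopA (g : PySem.Dict String (PySem.Set String)) (max_depth : Int)
    (visited : PySem.Set String) (queue : List (String × Int))
    (result : PySem.Dict Int (PySem.Set String)) : PySem.Dict Int (PySem.Set String) :=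
  match queue with
  | [] => result
  | (current, depth) :: rest =>
    if max_depth < depth then pvLoopA g max_depth visited rest result
    else if PySem.Set.contains visited current then pvLoopA g max_depth visited rest result
    else
      let visited' := PySem.Set.add visited current
      let result1 := if PySem.Dict.contains result depth then result
                     else PySem.Dict.insert result depth PySem.Set.empty
      let result2 := PySem.Dict.modify result1 depth PySem.Set.empty
                       (fun s => PySem.Set.add s current)
      pvLoopA g max_depth visited'
        (rest ++ (pvNeighbors g visited' current).map (fun n => (n, depth + 1))) result2
termination_by
  11 * (((g.values.flatMap (fun s => s) ++ queue.map Prod.fst).toFinset \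
          List.toFinset (visited : List String)).card) + queue.length
decreasing_by
  · have := pv_card_mono (g.values.flatMap (fun s => s) ++ rest.map Prod.fst)
      (g.values.flatMap (fun s => s) ++ ((current, depth) :: rest).map Prod.fst)
      (visited : List String) (pv_base_mono _ current depth rest)
    simp only [List.length_cons]
    omega
  · have := pv_card_mono (g.values.flatMap (fun s => s) ++ rest.map Prod.fst)
      (g.values.flatMap (fun s => s) ++ ((current, depth) :: rest).map Prod.fst)
      (visited : List String) (pv_base_mono _ current depth rest)
    simp only [List.length_cons]
    omega
  · rename_i h1 h2
    have hns := pv_ns_len g (PySem.Set.add visited current) current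
    have hnsub := pv_ns_subset g (PySem.Set.add visited current) current
    have hcurmem : current ∈ ((g.values.flatMap (fun s => s) ++
        ((current, depth) :: rest).map Prod.fst).toFinset \ List.toFinset (visited : List String)) := by
      simp only [Finset.mem_sdiff, List.mem_toFinset, List.mem_append, List.map_cons]
      constructor
      · right; simp
      · intro hc
        exact h2 ((PySem.Set.contains_iff visited current).2 hc)
    have hsub : ((g.values.flatMap (fun s => s) ++
        (rest ++ (pvNeighbors g (PySem.Set.add visited current) current).map
          (fun n => (n, depth + 1))).map Prod.fst).toFinset \
        List.toFinset ((PySem.Set.add visited current : PySem.Set String) : List String)) ⊆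
        ((g.values.flatMap (fun s => s) ++
          ((current, depth) :: rest).map Prod.fst).toFinset \
          List.toFinset (visited : List String)).erase current := by
      intro x hx
      obtain ⟨hin, hnv⟩ := Finset.mem_sdiff.1 hx
      rw [List.mem_toFinset] at hin
      have hnv' : x ∉ (PySem.Set.add visited current : List String) :=
        fun hm => hnv (List.mem_toFinset.2 hm)
      have hx1 : x ≠ current := fun he => hnv'
        (by rw [he]; exact (PySem.Set.mem_add visited current current).2 (Or.inr rfl))
      have hx2 : x ∉ (visited : List String) :=
        fun hv => hnv' ((PySem.Set.mem_add visited current x).2 (Or.inl hv))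
      rw [Finset.mem_erase, Finset.mem_sdiff, List.mem_toFinset, List.mem_toFinset]
      refine ⟨hx1, ?_, hx2⟩
      rcases List.mem_append.1 hin with h | h
      · exact List.mem_append.2 (Or.inl h)
      · apply List.mem_append.2
        rw [List.map_append] at h
        rcases List.mem_append.1 h with h | h
        · exact Or.inr (by simp only [List.map_cons, List.mem_cons]; exact Or.inr h)
        · rw [List.map_map] at h
          have hxns : x ∈ pvNeighbors g (PySem.Set.add visited current) current := by
            simpa using h
          exact Or.inl (hnsub hxns)
    have hcard := Finset.card_le_card hsub
    rw [Finset.card_erase_of_mem hcurmem] at hcard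
    have hpos : 0 < ((g.values.flatMap (fun s => s) ++
        ((current, depth) :: rest).map Prod.fst).toFinset \
        List.toFinset (visited : List String)).card := Finset.card_pos.2 ⟨current, hcurmem⟩
    simp only [List.length_append, List.length_map, List.length_cons]
    omega

def optimize_dependency_traversal (graph : List (String × List String)) (start_file : String)
    (max_depth : Int) : List (Int × List String) :=
  (pvLoopA (pvToGraph graph) max_depth PySem.Set.empty [(start_file, 0)] PySem.Dict.empty).items

-- ===== PORT B =====
-- one `node` of B's inner for-loop over the current frontier; state = (visited, result, next_frontier)
def pvStepB (g : PySem.Dict String (PySem.Set String)) (depth : Int)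
    (st : PySem.Set String × PySem.Dict Int (PySem.Set String) × List String)
    (node : String) : PySem.Set String × PySem.Dict Int (PySem.Set String) × List String :=
  if PySem.Set.contains st.1 node then st
  else
    let visited := PySem.Set.add st.1 node
    let result := PySem.Dict.insert st.2.1 depth
      (PySem.Set.add (PySem.Dict.getD st.2.1 depth PySem.Set.empty) node)
    (visited, result, st.2.2 ++ pvNeighbors g visited node)

-- `for depth in range(0, max_depth + 1)` with `break` on an empty frontier;
-- the lazy range is ported as (depth, remaining-iterations) counters, not a materialised list
def pvLevelsB (g : PySem.Dict String (PySem.Set String)) (visited : PySem.Set String)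
    (result : PySem.Dict Int (PySem.Set String)) (frontier : List String) (depth : Int) :
    Nat → PySem.Dict Int (PySem.Set String)
  | 0 => result
  | n + 1 =>
      if frontier.isEmpty then result
      else
        let st := frontier.foldl (pvStepB g depth) (visited, result, [])
        pvLevelsB g st.1 st.2.1 st.2.2 (depth + 1) n

def optimize_dependency_traversal_alt (graph : List (String × List String)) (start_file : String)
    (max_depth : Int) : List (Int × List String) :=
  (pvLevelsB (pvToGraph graph) PySem.Set.empty PySem.Dict.empty [start_file] 0
    (max_depth + 1).toNat).items

-- ===== PRECONDITION & SPEC =====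
-- Pre_ excludes graphs in which some entry has more than 10 distinct neighbours: there A's
-- `list(graph.get(...))[:10]` truncates in Python's set hash order, which is not modelled
-- (on every admitted input the [:10] slice keeps the whole neighbour set, so order is irrelevant).
def Pre_optimize_dependency_traversal (graph : List (String × List String)) (start_file : String) (max_depth : Int) : Prop :=
  ∀ p ∈ graph, (PySem.Set.ofList p.2).length ≤ 10
instance (graph : List (String × List String)) (start_file : String) (max_depth : Int) : Decidable (Pre_optimize_dependency_traversal graph start_file max_depth) := by unfold Pre_optimize_dependency_traversal; infer_instance

def pvWitness_optimize_dependency_traversal : (List (String × List String)) × String × Int :=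
  ([("a", ["b", "c"]), ("b", ["a"])], "a", 2)

def Spec_optimize_dependency_traversal (graph : List (String × List String)) (start_file : String) (max_depth : Int) (out : List (Int × List String)) : Prop := out = optimize_dependency_traversal_alt graph start_file max_depth
instance (graph : List (String × List String)) (start_file : String) (max_depth : Int) (out : List (Int × List String)) : Decidable (Spec_optimize_dependency_traversal graph start_file max_depth out) := by unfold Spec_optimize_dependency_traversal; infer_instance

-- ===== CLAIM (what is proved, stated in full; the proofs are below) =====
def Claim_equal_optimize_dependency_traversal : Prop := ∀ (graph : List (String × List String)) (start_file : String) (max_depth : Int), Dom_optimize_dependency_traversal graph start_file max_depth → Pre_optimize_dependency_traversal graph start_file max_depth → Spec_optimize_dependency_traversal graph start_file max_depth (optimize_dependency_traversal graph start_file max_depth)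

-- ===== LEMMAS AND PROOFS =====

theorem pv_loopA_nil (g : PySem.Dict String (PySem.Set String)) (m : Int) (v : PySem.Set String)
    (r : PySem.Dict Int (PySem.Set String)) : pvLoopA g m v [] r = r := by
  rw [pvLoopA]

theorem pv_loopA_skip_depth (g : PySem.Dict String (PySem.Set String)) (m : Int)
    (v : PySem.Set String) (c : String) (d : Int) (rest : List (String × Int))
    (r : PySem.Dict Int (PySem.Set String)) (h : m < d) :
    pvLoopA g m v ((c, d) :: rest) r = pvLoopA g m v rest r := by
  rw [pvLoopA]; simp [h]

theorem pv_loopA_skip_vis (g : PySem.Dict String (PySem.Set String)) (m : Int)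
    (v : PySem.Set String) (c : String) (d : Int) (rest : List (String × Int))
    (r : PySem.Dict Int (PySem.Set String)) (h : ¬ m < d) (h2 : PySem.Set.contains v c = true) :
    pvLoopA g m v ((c, d) :: rest) r = pvLoopA g m v rest r := by
  have hm : c ∈ v := (PySem.Set.contains_iff v c).1 h2
  rw [pvLoopA]; simp [h, hm]

theorem pv_loopA_step (g : PySem.Dict String (PySem.Set String)) (m : Int)
    (v : PySem.Set String) (c : String) (d : Int) (rest : List (String × Int))
    (r : PySem.Dict Int (PySem.Set String)) (h : ¬ m < d) (h2 : PySem.Set.contains v c = false) :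
    pvLoopA g m v ((c, d) :: rest) r =
      pvLoopA g m (PySem.Set.add v c)
        (rest ++ (pvNeighbors g (PySem.Set.add v c) c).map (fun n => (n, d + 1)))
        (PySem.Dict.modify (if PySem.Dict.contains r d then r else PySem.Dict.insert r d PySem.Set.empty)
          d PySem.Set.empty (fun s => PySem.Set.add s c)) := by
  have hm : c ∉ v := fun hmem => by
    rw [(PySem.Set.contains_iff v c).2 hmem] at h2; simp at h2
  rw [pvLoopA]; simp [h, hm]

theorem pv_skip_all (g : PySem.Dict String (PySem.Set String)) (m : Int) :
    ∀ (q : List (String × Int)) (v : PySem.Set String) (r : PySem.Dict Int (PySem.Set String)),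
      (∀ x ∈ q, m < x.2) → pvLoopA g m v q r = r := by
  intro q
  induction q with
  | nil => intro v r _; exact pv_loopA_nil g m v r
  | cons x rest ih =>
      intro v r h
      obtain ⟨c, d⟩ := x
      rw [pv_loopA_skip_depth g m v c d rest r (h (c, d) (by simp))]
      exact ih v r (fun y hy => h y (by simp [hy]))

-- A's two result-update statements compute B's single insert
theorem pv_result_eq (r : PySem.Dict Int (PySem.Set String)) (d : Int) (c : String) :
    PySem.Dict.modify (if PySem.Dict.contains r d then r else PySem.Dict.insert r d PySem.Set.empty)
        d PySem.Set.empty (fun s => PySem.Set.add s c)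
      = PySem.Dict.insert r d (PySem.Set.add (PySem.Dict.getD r d PySem.Set.empty) c) := by
  by_cases h : PySem.Dict.contains r d
  · simp [h, PySem.Dict.modify]
  · have hb : PySem.Dict.contains r d = false := by simpa using h
    rw [if_neg (by simp [hb]), PySem.Dict.modify, PySem.Dict.getD_insert, if_pos rfl,
      PySem.Dict.insert_insert_self, PySem.Dict.getD_of_not_contains r PySem.Set.empty hb]

-- A's queue processing of one whole depth layer IS B's inner foldl over the frontier
theorem pv_inner (g : PySem.Dict String (PySem.Set String)) (m : Int) (d : Int) (hd : ¬ m < d) :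
    ∀ (f1 : List String) (v : PySem.Set String) (r : PySem.Dict Int (PySem.Set String))
      (f2 : List String),
      pvLoopA g m v (f1.map (fun s => (s, d)) ++ f2.map (fun s => (s, d + 1))) r =
        pvLoopA g m (f1.foldl (pvStepB g d) (v, r, f2)).1
          ((f1.foldl (pvStepB g d) (v, r, f2)).2.2.map (fun s => (s, d + 1)))
          (f1.foldl (pvStepB g d) (v, r, f2)).2.1 := by
  intro f1
  induction f1 with
  | nil => intro v r f2; simp
  | cons x xs ih =>
      intro v r f2
      simp only [List.map_cons, List.cons_append, List.foldl_cons]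
      by_cases hv : PySem.Set.contains v x
      · rw [pv_loopA_skip_vis g m v x d _ r hd hv]
        rw [show pvStepB g d (v, r, f2) x = (v, r, f2) by
          simp [pvStepB, (PySem.Set.contains_iff v x).1 hv]]
        exact ih v r f2
      · rw [pv_loopA_step g m v x d _ r hd (by simpa using hv)]
        rw [show pvStepB g d (v, r, f2) x =
            (PySem.Set.add v x,
             PySem.Dict.insert r d (PySem.Set.add (PySem.Dict.getD r d PySem.Set.empty) x),
             f2 ++ pvNeighbors g (PySem.Set.add v x) x) by
          have hm : x ∉ v := fun hmem => hv ((PySem.Set.contains_iff v x).2 hmem)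
          simp [pvStepB, hm]]
        rw [pv_result_eq]
        rw [show xs.map (fun s => (s, d)) ++ f2.map (fun s => (s, d + 1)) ++
              (pvNeighbors g (PySem.Set.add v x) x).map (fun n => (n, d + 1)) =
            xs.map (fun s => (s, d)) ++
              (f2 ++ pvNeighbors g (PySem.Set.add v x) x).map (fun s => (s, d + 1)) by
          simp [List.map_append]]
        exact ih (PySem.Set.add v x)
          (PySem.Dict.insert r d (PySem.Set.add (PySem.Dict.getD r d PySem.Set.empty) x))
          (f2 ++ pvNeighbors g (PySem.Set.add v x) x)

theorem pv_levels (g : PySem.Dict String (PySem.Set String)) (m : Int) :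
    ∀ (n : Nat) (d : Int), d ≤ m → (n : Int) = m - d →
    ∀ (f1 f2 : List String) (v : PySem.Set String) (r : PySem.Dict Int (PySem.Set String)),
      pvLoopA g m v (f1.map (fun s => (s, d)) ++ f2.map (fun s => (s, d + 1))) r =
        pvLevelsB g (f1.foldl (pvStepB g d) (v, r, f2)).1
          ((f1.foldl (pvStepB g d) (v, r, f2)).2.1)
          ((f1.foldl (pvStepB g d) (v, r, f2)).2.2) (d + 1) n := by
  intro n
  induction n with
  | zero =>
      intro d hdm hn f1 f2 v r
      rw [pv_inner g m d (by omega) f1 v r f2]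
      rw [pv_skip_all g m _ _ _ (by
        intro y hy; simp at hy; obtain ⟨s, -, he⟩ := hy
        rw [← he]; show m < d + 1; omega)]
      rfl
  | succ n ih =>
      intro d hdm hn f1 f2 v r
      rw [pv_inner g m d (by omega) f1 v r f2]
      rw [pvLevelsB]
      by_cases hf : (f1.foldl (pvStepB g d) (v, r, f2)).2.2 = []
      · rw [hf]; simp [pv_loopA_nil]
      · rw [if_neg (by simpa [List.isEmpty_iff] using hf)]
        have := ih (d + 1) (by push_cast at hn; omega) (by push_cast at hn ⊢; omega)
          (f1.foldl (pvStepB g d) (v, r, f2)).2.2 []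
          (f1.foldl (pvStepB g d) (v, r, f2)).1 (f1.foldl (pvStepB g d) (v, r, f2)).2.1
        simpa using this

-- ===== VERDICT (by name: the statement is the Claim_ definition above) =====
theorem optimize_dependency_traversal_spec : Claim_equal_optimize_dependency_traversal := by
  intro graph start_file max_depth _ _
  unfold Spec_optimize_dependency_traversal
  unfold optimize_dependency_traversal optimize_dependency_traversal_alt
  congr 1
  by_cases hm : max_depth < 0
  · rw [pv_skip_all _ _ _ _ _ (by
      intro y hy; simp at hy; rw [hy]; show max_depth < (0:Int); omega)]
    rw [show (max_depth + 1).toNat = 0 by omega]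
    rfl
  · rw [show (max_depth + 1).toNat = max_depth.toNat + 1 by omega]
    rw [pvLevelsB]
    rw [if_neg (by simp)]
    have := pv_levels (pvToGraph graph) max_depth max_depth.toNat 0 (by omega)
      (by omega) [start_file] [] PySem.Set.empty PySem.Dict.empty
    simpa using this
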